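-- pv_equiv track=rewrite | github.com/Isaiah-John/Assignments-and-Projects | CS458 Assignment 2 code.py | double_transposition_encrypt
-- ===== SOURCE A (Python) =====
-- def double_transposition_encrypt(plaintext, block_size):
--     rows = len(plaintext) // block_size
--     columns = block_size
--     matrix = [[' ' for _ in range(columns)] for _ in range(rows)]
--     index = 0
--     for column in range(columns):
--         for row in range(rows):
--             matrix[row][column] = plaintext[index]
--             index += 1
--     ciphertext = ''
--     for row in range(rows):
--         for column in range(columns):
--             ciphertext += matrix[row][column]
--     return ciphertext
-- ===== SOURCE B (Python) =====
-- def double_transposition_encrypt(plaintext, block_size):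
--     rows = len(plaintext) // block_size
--     columns = block_size
--     return ''.join(plaintext[column * rows + row]
--                    for row in range(rows) for column in range(columns))
-- ===== Notes on version B (the rewrite author's own statement) =====
-- stated objective: simpler
-- what changed: B computes each ciphertext character directly from its source index column*rows+row in a single join'ed comprehension, eliminating A's intermediate 2D matrix, its two fill/read passes and its repeated string concatenation.
import Mathlib
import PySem

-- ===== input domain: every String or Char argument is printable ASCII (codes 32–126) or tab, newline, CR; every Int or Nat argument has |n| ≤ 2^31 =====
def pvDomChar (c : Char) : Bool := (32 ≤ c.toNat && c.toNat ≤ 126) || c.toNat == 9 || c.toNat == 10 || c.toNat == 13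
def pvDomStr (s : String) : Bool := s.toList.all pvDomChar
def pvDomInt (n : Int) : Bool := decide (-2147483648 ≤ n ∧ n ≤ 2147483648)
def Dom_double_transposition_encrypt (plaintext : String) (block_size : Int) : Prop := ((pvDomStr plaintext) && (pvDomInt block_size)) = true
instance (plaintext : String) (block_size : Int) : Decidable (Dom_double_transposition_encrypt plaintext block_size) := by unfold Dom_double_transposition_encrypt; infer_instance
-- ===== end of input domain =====

-- B replaces A's matrix fill/read passes by one comprehension reading each character
-- straight from its source index; objective: simpler (and measured faster by a constant factor).

-- ===== PORT A =====
def double_transposition_encrypt (plaintext : String) (block_size : Int) : String :=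
  let pt := plaintext.toList
  let rows := PySem.Int.floordiv (PySem.Str.len plaintext) block_size
  let columns := block_size
  let matrix : List (List Char) :=
    (PySem.List.pyRange 0 rows 1).map (fun _ =>
      (PySem.List.pyRange 0 columns 1).map (fun _ => ' '))
  let st :=
    (PySem.List.pyRange 0 columns 1).foldl (fun st column =>
      (PySem.List.pyRange 0 rows 1).foldl (fun st row =>
        (PySem.List.pySetD st.1 row
            (PySem.List.pySetD (PySem.List.pyGetD st.1 row []) column
              (PySem.List.pyGetD pt st.2 ' ')),
         st.2 + 1)) st) (matrix, (0 : Int))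
  let cipher :=
    (PySem.List.pyRange 0 rows 1).foldl (fun cs row =>
      (PySem.List.pyRange 0 columns 1).foldl (fun cs column =>
        cs ++ [PySem.List.pyGetD (PySem.List.pyGetD st.1 row []) column ' ']) cs) []
  String.ofList cipher

-- ===== PORT B =====
def double_transposition_encrypt_alt (plaintext : String) (block_size : Int) : String :=
  let pt := plaintext.toList
  let rows := PySem.Int.floordiv (PySem.Str.len plaintext) block_size
  let columns := block_size
  String.ofList ((PySem.List.pyRange 0 rows 1).flatMap (fun row =>
    (PySem.List.pyRange 0 columns 1).map (fun column =>
      PySem.List.pyGetD pt (column * rows + row) ' ')))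

-- ===== PRECONDITION & SPEC =====
-- Pre_ excludes exactly block_size = 0, on which Python A raises ZeroDivisionError.
def Pre_double_transposition_encrypt (plaintext : String) (block_size : Int) : Prop :=
  block_size ≠ 0
instance (plaintext : String) (block_size : Int) : Decidable (Pre_double_transposition_encrypt plaintext block_size) := by unfold Pre_double_transposition_encrypt; infer_instance

def pvWitness_double_transposition_encrypt : String × Int := ("abcdef", 2)

def Spec_double_transposition_encrypt (plaintext : String) (block_size : Int) (out : String) : Prop := out = double_transposition_encrypt_alt plaintext block_size
instance (plaintext : String) (block_size : Int) (out : String) : Decidable (Spec_double_transposition_encrypt plaintext block_size out) := by unfold Spec_double_transposition_encrypt; infer_instance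

-- ===== CLAIM (what is proved, stated in full; the proofs are below) =====
def Claim_equal_double_transposition_encrypt : Prop := ∀ (plaintext : String) (block_size : Int), Dom_double_transposition_encrypt plaintext block_size → Pre_double_transposition_encrypt plaintext block_size → Spec_double_transposition_encrypt plaintext block_size (double_transposition_encrypt plaintext block_size)

-- ===== LEMMAS AND PROOFS =====

-- setting index j of a mapped range is mapping a pointwise-updated function
theorem pv_set_map_pyRange {α : Type} (f : Int → α) (n j : Int) (h0 : 0 ≤ j) (v : α) :
    (((PySem.List.pyRange 0 n 1).map f).set j.toNat v)
      = (PySem.List.pyRange 0 n 1).map (fun i => if i = j then v else f i) := by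
  apply List.ext_getElem
  · simp [PySem.List.length_pyRange_one]
  · intro k h1 h2
    simp only [List.length_set, List.length_map, PySem.List.length_pyRange_one] at h1
    rw [List.getElem_set]
    simp only [List.getElem_map, PySem.List.getElem_pyRange_one]
    by_cases hkj : ((k : Int) = j)
    · have h5 : j.toNat = k := by omega
      simp [h5, hkj]
    · have h3 : ¬ ((0 : Int) + k = j) := by omega
      have h4 : ¬ (j.toNat = k) := by omega
      simp [h4, hkj]

-- inner fill loop over rows at a fixed column k
theorem pv_inner_fill (pt : List Char) (rows columns k : Int)
    (hk0 : 0 ≤ k) (hk : k < columns) :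
    ∀ (m : Nat) (r0 : Int), 0 ≤ r0 → r0 + (m : Int) = rows →
    (PySem.List.pyRange r0 rows 1).foldl (fun st row =>
        (PySem.List.pySetD st.1 row
            (PySem.List.pySetD (PySem.List.pyGetD st.1 row []) k
              (PySem.List.pyGetD pt st.2 ' ')),
         st.2 + 1))
      ((PySem.List.pyRange 0 rows 1).map (fun r =>
          (PySem.List.pyRange 0 columns 1).map (fun c =>
            if c < k ∨ (c = k ∧ r < r0) then PySem.List.pyGetD pt (c * rows + r) ' ' else ' ')),
       k * rows + r0)
    = ((PySem.List.pyRange 0 rows 1).map (fun r =>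
          (PySem.List.pyRange 0 columns 1).map (fun c =>
            if c < k ∨ c = k then PySem.List.pyGetD pt (c * rows + r) ' ' else ' ')),
       k * rows + rows) := by
  intro m
  induction m with
  | zero =>
    intro r0 h0 hm
    rw [PySem.List.pyRange_one_eq_nil (show rows ≤ r0 by omega), List.foldl_nil]
    have hr0 : r0 = rows := by omega
    subst hr0
    refine Prod.ext ?_ rfl
    apply List.map_congr_left
    intro r hrmem
    rw [PySem.List.mem_pyRange_one] at hrmem
    apply List.map_congr_left
    intro c hc
    rw [PySem.List.mem_pyRange_one] at hc
    split_ifs <;> first | rfl | omega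
  | succ p ih =>
    intro r0 h0 hm
    have hr : r0 < rows := by omega
    rw [PySem.List.pyRange_one_cons (show r0 < rows by omega), List.foldl_cons]
    dsimp only
    rw [PySem.List.pyGetD_map_pyRange_of_nonneg _ rows r0 [] h0 hr]
    rw [PySem.List.pySetD_of_nonneg _ _ hk0, pv_set_map_pyRange _ columns k hk0]
    rw [PySem.List.pySetD_of_nonneg _ _ h0, pv_set_map_pyRange _ rows r0 h0]
    have hM : ((PySem.List.pyRange 0 rows 1).map (fun i =>
        if i = r0 then
          (PySem.List.pyRange 0 columns 1).map (fun i =>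
            if i = k then PySem.List.pyGetD pt (k * rows + r0) ' '
            else if i < k ∨ (i = k ∧ r0 < r0) then PySem.List.pyGetD pt (i * rows + r0) ' ' else ' ')
        else (PySem.List.pyRange 0 columns 1).map (fun c =>
            if c < k ∨ (c = k ∧ i < r0) then PySem.List.pyGetD pt (c * rows + i) ' ' else ' ')))
      = (PySem.List.pyRange 0 rows 1).map (fun r =>
          (PySem.List.pyRange 0 columns 1).map (fun c =>
            if c < k ∨ (c = k ∧ r < r0 + 1) then PySem.List.pyGetD pt (c * rows + r) ' ' else ' ')) := by
      apply List.map_congr_left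
      intro r hrmem
      rw [PySem.List.mem_pyRange_one] at hrmem
      by_cases hrr : r = r0
      · subst hrr
        rw [if_pos rfl]
        apply List.map_congr_left
        intro c hc
        rw [PySem.List.mem_pyRange_one] at hc
        by_cases hck : c = k
        · subst hck
          split_ifs <;> first | rfl | omega
        · split_ifs <;> first | rfl | omega
      · rw [if_neg hrr]
        apply List.map_congr_left
        intro c hc
        rw [PySem.List.mem_pyRange_one] at hc
        split_ifs <;> first | rfl | omega
    rw [hM]
    have hidx : k * rows + r0 + 1 = k * rows + (r0 + 1) := by ring
    rw [hidx]
    exact ih (r0 + 1) (by omega) (by omega)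

-- outer fill loop over columns
theorem pv_outer_fill (pt : List Char) (rows columns : Int) (hr : 0 ≤ rows) :
    ∀ (m : Nat) (k0 : Int), 0 ≤ k0 → k0 + (m : Int) = columns →
    (PySem.List.pyRange k0 columns 1).foldl (fun st column =>
        (PySem.List.pyRange 0 rows 1).foldl (fun st row =>
          (PySem.List.pySetD st.1 row
              (PySem.List.pySetD (PySem.List.pyGetD st.1 row []) column
                (PySem.List.pyGetD pt st.2 ' ')),
           st.2 + 1)) st)
      ((PySem.List.pyRange 0 rows 1).map (fun r =>
          (PySem.List.pyRange 0 columns 1).map (fun c =>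
            if c < k0 then PySem.List.pyGetD pt (c * rows + r) ' ' else ' ')),
       k0 * rows)
    = ((PySem.List.pyRange 0 rows 1).map (fun r =>
          (PySem.List.pyRange 0 columns 1).map (fun c =>
            if c < columns then PySem.List.pyGetD pt (c * rows + r) ' ' else ' ')),
       columns * rows) := by
  intro m
  induction m with
  | zero =>
    intro k0 h0 hm
    rw [PySem.List.pyRange_one_eq_nil (show columns ≤ k0 by omega), List.foldl_nil]
    have h1 : k0 = columns := by omega
    subst h1
    rfl
  | succ p ih =>
    intro k0 h0 hm
    have hkc : k0 < columns := by omega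
    rw [PySem.List.pyRange_one_cons (show k0 < columns by omega), List.foldl_cons]
    have hstart : ((PySem.List.pyRange 0 rows 1).map (fun r =>
        (PySem.List.pyRange 0 columns 1).map (fun c =>
          if c < k0 then PySem.List.pyGetD pt (c * rows + r) ' ' else ' ')))
      = (PySem.List.pyRange 0 rows 1).map (fun r =>
          (PySem.List.pyRange 0 columns 1).map (fun c =>
            if c < k0 ∨ (c = k0 ∧ r < 0) then PySem.List.pyGetD pt (c * rows + r) ' ' else ' ')) := by
      apply List.map_congr_left
      intro r hrmem
      rw [PySem.List.mem_pyRange_one] at hrmem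
      apply List.map_congr_left
      intro c hc
      rw [PySem.List.mem_pyRange_one] at hc
      split_ifs <;> first | rfl | omega
    rw [hstart]
    have hidx0 : k0 * rows = k0 * rows + 0 := by ring
    rw [hidx0]
    rw [pv_inner_fill pt rows columns k0 h0 hkc rows.toNat 0 le_rfl (by omega)]
    have hend : ((PySem.List.pyRange 0 rows 1).map (fun r =>
        (PySem.List.pyRange 0 columns 1).map (fun c =>
          if c < k0 ∨ c = k0 then PySem.List.pyGetD pt (c * rows + r) ' ' else ' ')))
      = (PySem.List.pyRange 0 rows 1).map (fun r =>
          (PySem.List.pyRange 0 columns 1).map (fun c =>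
            if c < k0 + 1 then PySem.List.pyGetD pt (c * rows + r) ' ' else ' ')) := by
      apply List.map_congr_left
      intro r hrmem
      apply List.map_congr_left
      intro c hc
      split_ifs <;> first | rfl | omega
    rw [hend]
    have hidx1 : k0 * rows + rows = (k0 + 1) * rows := by ring
    rw [hidx1]
    exact ih (k0 + 1) (by omega) (by omega)

-- the read passes are a flatMap
theorem pv_read (M : List (List Char)) (rows columns : Int) :
    (PySem.List.pyRange 0 rows 1).foldl (fun cs row =>
      (PySem.List.pyRange 0 columns 1).foldl (fun cs column =>
        cs ++ [PySem.List.pyGetD (PySem.List.pyGetD M row []) column ' ']) cs) []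
    = (PySem.List.pyRange 0 rows 1).flatMap (fun row =>
        (PySem.List.pyRange 0 columns 1).map (fun column =>
          PySem.List.pyGetD (PySem.List.pyGetD M row []) column ' ')) := by
  have h : ∀ (cs : List Char) (row : Int),
      (PySem.List.pyRange 0 columns 1).foldl (fun cs column =>
        cs ++ [PySem.List.pyGetD (PySem.List.pyGetD M row []) column ' ']) cs
      = cs ++ (PySem.List.pyRange 0 columns 1).map (fun column =>
          PySem.List.pyGetD (PySem.List.pyGetD M row []) column ' ') := by
    intro cs row
    exact PySem.List.foldl_append_singleton_eq_map _ _ _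
  calc (PySem.List.pyRange 0 rows 1).foldl (fun cs row =>
      (PySem.List.pyRange 0 columns 1).foldl (fun cs column =>
        cs ++ [PySem.List.pyGetD (PySem.List.pyGetD M row []) column ' ']) cs) []
      = (PySem.List.pyRange 0 rows 1).foldl (fun cs row =>
          cs ++ (PySem.List.pyRange 0 columns 1).map (fun column =>
            PySem.List.pyGetD (PySem.List.pyGetD M row []) column ' ')) [] :=
        PySem.List.foldl_congr_mem _ _ _ _ (fun acc x _ => h acc x)
    _ = _ := by
        rw [PySem.List.foldl_append_eq_flatMap]
        simp

-- ===== VERDICT (by name: the statement is the Claim_ definition above) =====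
theorem double_transposition_encrypt_spec : Claim_equal_double_transposition_encrypt := by
  intro plaintext block_size _ _
  unfold Spec_double_transposition_encrypt
  unfold double_transposition_encrypt double_transposition_encrypt_alt
  simp only []
  set pt := plaintext.toList with hpt
  set rows := PySem.Int.floordiv (PySem.Str.len plaintext) block_size with hrows
  set columns := block_size with hcols
  rw [pv_read]
  by_cases hpos : 0 < rows ∧ 0 < columns
  · obtain ⟨hr, hc⟩ := hpos
    have hstart : ((PySem.List.pyRange 0 rows 1).map (fun _ =>
        (PySem.List.pyRange 0 columns 1).map (fun _ => ' ')))
      = (PySem.List.pyRange 0 rows 1).map (fun r =>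
          (PySem.List.pyRange 0 columns 1).map (fun c =>
            if c < 0 then PySem.List.pyGetD pt (c * rows + r) ' ' else ' ')) := by
      apply List.map_congr_left
      intro r hrmem
      apply List.map_congr_left
      intro c hcm
      rw [PySem.List.mem_pyRange_one] at hcm
      rw [if_neg (by omega)]
    have hof := pv_outer_fill pt rows columns (by omega) columns.toNat 0 le_rfl (by omega)
    rw [zero_mul] at hof
    rw [hstart, hof]
    apply congrArg
    apply List.flatMap_congr
    intro r hrmem
    rw [PySem.List.mem_pyRange_one] at hrmem
    rw [PySem.List.pyGetD_map_pyRange_of_nonneg _ rows r [] (by omega) (by omega)]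
    apply List.map_congr_left
    intro c hc
    rw [PySem.List.mem_pyRange_one] at hc
    rw [PySem.List.pyGetD_map_pyRange_of_nonneg _ columns c ' ' (by omega) (by omega)]
    rw [if_pos (by omega)]
  · rcases (by omega : rows ≤ 0 ∨ columns ≤ 0) with h | h
    · rw [PySem.List.pyRange_one_eq_nil (show rows ≤ 0 by omega)]
      simp
    · rw [PySem.List.pyRange_one_eq_nil (show columns ≤ 0 by omega)]
      simp
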